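-- pv_equiv track=rewrite | github.com/lovehyun/tutorial-python | 1.python_basics/4.ifandfor/iteration3.py | find_duplicate_values2
-- ===== SOURCE A (Python) =====
-- def flatten_matrix(matrix):
--     flattened = []
--     for row in matrix:
--         flattened.extend(row)
--     return flattened
--
-- def find_duplicate_values2(matrix1, matrix2):
--     # 입력 배열을 정렬합니다.
--     sorted_array1 = sorted(flatten_matrix(matrix1))
--     sorted_array2 = sorted(flatten_matrix(matrix2))
--
--     # 중복된 값을 저장할 리스트를 생성합니다.
--     duplicate_values = []
--
--     # 두 배열을 순회하면서 중복된 값을 찾습니다.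
--     i = 0
--     j = 0
--     while i < len(sorted_array1) and j < len(sorted_array2):
--         if sorted_array1[i] == sorted_array2[j]:
--             # 중복된 값이면 리스트에 추가합니다.
--             duplicate_values.append(sorted_array1[i])
--             i += 1
--             j += 1
--         elif sorted_array1[i] < sorted_array2[j]:
--             i += 1
--         else:
--             j += 1
--
--     return duplicate_values
-- ===== SOURCE B (Python) =====
-- def find_duplicate_values2(matrix1, matrix2):
--     c1 = {}
--     for row in matrix1:
--         for v in row:
--             c1[v] = c1.get(v, 0) + 1
--     c2 = {}
--     for row in matrix2:
--         for v in row: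
--             c2[v] = c2.get(v, 0) + 1
--     duplicate_values = []
--     for v in sorted(k for k in c1 if k in c2):
--         duplicate_values.extend([v] * min(c1[v], c2[v]))
--     return duplicate_values
-- ===== Notes on version B (the rewrite author's own statement) =====
-- stated objective: alternative
-- what changed: Replaced sort-both-lists plus two-pointer merge walk by counting dictionaries: build occurrence counts of each flattened matrix, then emit each common distinct value (sorted) min(c1[v], c2[v]) times.
import Mathlib
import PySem

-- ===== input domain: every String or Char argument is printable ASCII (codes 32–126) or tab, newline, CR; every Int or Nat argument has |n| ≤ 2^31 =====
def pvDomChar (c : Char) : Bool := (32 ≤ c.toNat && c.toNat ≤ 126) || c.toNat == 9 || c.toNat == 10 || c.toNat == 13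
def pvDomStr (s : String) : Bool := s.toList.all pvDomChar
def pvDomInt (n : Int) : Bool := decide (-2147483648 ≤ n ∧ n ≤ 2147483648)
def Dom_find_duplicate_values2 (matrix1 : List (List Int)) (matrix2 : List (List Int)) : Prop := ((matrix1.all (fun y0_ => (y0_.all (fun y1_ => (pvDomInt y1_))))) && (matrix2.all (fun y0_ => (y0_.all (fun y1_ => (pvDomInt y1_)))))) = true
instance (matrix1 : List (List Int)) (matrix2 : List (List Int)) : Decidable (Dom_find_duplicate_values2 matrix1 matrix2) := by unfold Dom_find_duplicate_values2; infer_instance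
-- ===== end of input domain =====

-- B replaces A's sort-both-lists-then-two-pointer-merge by counting dictionaries plus a sort of
-- the distinct common values (objective: alternative algorithm of similar cost).

-- ===== PORT A =====
def flatten_matrix (matrix : List (List Int)) : List Int :=
  matrix.foldl (fun flattened row => flattened ++ row) []

-- A's two-pointer while loop, as recursion on the two remaining list suffixes;
-- the Nat counter bounds the number of remaining loop iterations (i and j only advance)
def mergeDupGo : Nat → List Int → List Int → List Int
  | n + 1, a :: t1, b :: t2 =>
      if a = b then a :: mergeDupGo n t1 t2
      else if a < b then mergeDupGo n t1 (b :: t2)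
      else mergeDupGo n (a :: t1) t2
  | _, _, _ => []

def mergeDup (l1 l2 : List Int) : List Int := mergeDupGo (l1.length + l2.length) l1 l2

def find_duplicate_values2 (matrix1 : List (List Int)) (matrix2 : List (List Int)) : List Int :=
  mergeDup (PySem.List.sorted (flatten_matrix matrix1) (fun x => x) false)
           (PySem.List.sorted (flatten_matrix matrix2) (fun x => x) false)

-- ===== PORT B =====
def find_duplicate_values2_alt (matrix1 : List (List Int)) (matrix2 : List (List Int)) : List Int :=
  let c1 := matrix1.foldl (fun d row => row.foldl (fun d v => d.insert v (d.getD v 0 + 1)) d) (PySem.Dict.empty : PySem.Dict Int Int)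
  let c2 := matrix2.foldl (fun d row => row.foldl (fun d v => d.insert v (d.getD v 0 + 1)) d) (PySem.Dict.empty : PySem.Dict Int Int)
  let ks := PySem.List.sorted (c1.keys.filter (fun k => c2.contains k)) (fun x => x) false
  ks.foldl (fun acc v => acc ++ List.replicate (min (c1.getD v 0) (c2.getD v 0)).toNat v) []

-- ===== PRECONDITION & SPEC =====
def Spec_find_duplicate_values2 (matrix1 : List (List Int)) (matrix2 : List (List Int)) (out : List Int) : Prop := out = find_duplicate_values2_alt matrix1 matrix2
instance (matrix1 : List (List Int)) (matrix2 : List (List Int)) (out : List Int) : Decidable (Spec_find_duplicate_values2 matrix1 matrix2 out) := by unfold Spec_find_duplicate_values2; infer_instance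

-- ===== CLAIM (what is proved, stated in full; the proofs are below) =====
def Claim_equal_find_duplicate_values2 : Prop := ∀ (matrix1 : List (List Int)) (matrix2 : List (List Int)), Dom_find_duplicate_values2 matrix1 matrix2 → Spec_find_duplicate_values2 matrix1 matrix2 (find_duplicate_values2 matrix1 matrix2)

-- ===== LEMMAS AND PROOFS =====

theorem flatten_matrix_eq : ∀ (m : List (List Int)) (acc : List Int),
    m.foldl (fun f r => f ++ r) acc = acc ++ m.flatten := by
  intro m
  induction m with
  | nil => simp
  | cons r t ih => intro acc; simp [List.foldl_cons, ih]

theorem foldl_nested {β : Type} (m : List (List Int)) (f : β → Int → β) (d : β) :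
    m.foldl (fun d row => row.foldl f d) d = m.flatten.foldl f d := by
  induction m generalizing d with
  | nil => simp
  | cons r t ih => simp [List.foldl_cons, List.foldl_append, ih]

theorem mergeDupGo_sublist_left (n : Nat) (l1 l2 : List Int) : (mergeDupGo n l1 l2).Sublist l1 := by
  fun_induction mergeDupGo n l1 l2 <;> simp_all

theorem mergeDup_sublist_left (l1 l2 : List Int) : (mergeDup l1 l2).Sublist l1 :=
  mergeDupGo_sublist_left _ l1 l2

theorem count_eq_zero_of_lt_head (a b : Int) (t : List Int)
    (h : (b :: t).Pairwise (· ≤ ·)) (hab : a < b) : (b :: t).count a = 0 := by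
  rw [List.count_eq_zero]
  intro hmem
  rcases List.mem_cons.1 hmem with rfl | hm
  · omega
  · have := (List.pairwise_cons.1 h).1 a hm; omega

theorem mergeDupGo_count : ∀ (n : Nat) (l1 l2 : List Int), l1.length + l2.length ≤ n →
    l1.Pairwise (· ≤ ·) → l2.Pairwise (· ≤ ·) →
    ∀ v, (mergeDupGo n l1 l2).count v = min (l1.count v) (l2.count v) := by
  intro n l1 l2
  fun_induction mergeDupGo n l1 l2 with
  | case1 n t1 a t2 ih =>
      intro hlen h1 h2 v
      have ih := ih (by simp at hlen ⊢; omega) h1.of_cons h2.of_cons v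
      simp only [List.count_cons, ih]
      by_cases hv : a = v <;> simp [hv]
  | case2 n a t1 b t2 heq hlt ih =>
      intro hlen h1 h2 v
      rw [ih (by simp at hlen ⊢; omega) h1.of_cons h2 v]
      by_cases hv : a = v
      · subst hv
        have hz := count_eq_zero_of_lt_head a b t2 h2 hlt
        simp [hz]
      · simp [List.count_cons, hv]
  | case3 n a t1 b t2 heq hlt ih =>
      intro hlen h1 h2 v
      rw [ih (by simp at hlen ⊢; omega) h1 h2.of_cons v]
      by_cases hv : b = v
      · subst hv
        have hvb : b < a := by omega
        have hz := count_eq_zero_of_lt_head b a t1 h1 hvb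
        simp [hz]
      · simp [List.count_cons, hv]
  | case4 n x y h =>
      intro hlen _ _ v
      rcases x with _ | ⟨a, t1⟩ <;> rcases y with _ | ⟨b, t2⟩ <;> simp [mergeDupGo]
      rcases n with _ | n
      · simp at hlen
      · exact (h n a t1 b t2 rfl rfl rfl).elim

theorem mergeDup_count (l1 l2 : List Int) (h1 : l1.Pairwise (· ≤ ·)) (h2 : l2.Pairwise (· ≤ ·))
    (v : Int) : (mergeDup l1 l2).count v = min (l1.count v) (l2.count v) :=
  mergeDupGo_count _ l1 l2 le_rfl h1 h2 v

theorem blocks_pairwise (ks : List Int) (n : Int → Nat) (h : ks.Pairwise (· < ·)) :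
    (ks.flatMap (fun v => List.replicate (n v) v)).Pairwise (· ≤ ·) := by
  induction ks with
  | nil => simp
  | cons k t ih =>
      simp only [List.flatMap_cons]
      rw [List.pairwise_append]
      refine ⟨List.pairwise_replicate.2 (Or.inr le_rfl), ih h.of_cons, ?_⟩
      intro a ha b hb
      obtain ⟨-, rfl⟩ := List.mem_replicate.1 ha
      obtain ⟨v, hv, hbv⟩ := List.mem_flatMap.1 hb
      obtain ⟨-, rfl⟩ := List.mem_replicate.1 hbv
      exact le_of_lt ((List.pairwise_cons.1 h).1 _ hv)

theorem blocks_count (ks : List Int) (n : Int → Nat) (h : ks.Pairwise (· < ·)) (w : Int) :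
    (ks.flatMap (fun v => List.replicate (n v) v)).count w = if w ∈ ks then n w else 0 := by
  induction ks with
  | nil => simp
  | cons k t ih =>
      simp only [List.flatMap_cons, List.count_append, ih h.of_cons, List.count_replicate]
      by_cases hw : w = k
      · subst hw
        have hnot : w ∉ t := fun hm => absurd ((List.pairwise_cons.1 h).1 w hm) (lt_irrefl w)
        simp [hnot]
      · have hkw : ¬ k = w := fun hkw => hw hkw.symm
        simp [hw, hkw]

-- ===== VERDICT (by name: the statement is the Claim_ definition above) =====
theorem find_duplicate_values2_spec : Claim_equal_find_duplicate_values2 := by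
  unfold Claim_equal_find_duplicate_values2 Spec_find_duplicate_values2
  intro m1 m2 _
  simp only [find_duplicate_values2, find_duplicate_values2_alt, flatten_matrix, flatten_matrix_eq, List.nil_append]
  rw [foldl_nested, foldl_nested, PySem.Dict.foldl_insert_getD_add_one_eq_counter, PySem.Dict.foldl_insert_getD_add_one_eq_counter]
  set f1 := m1.flatten with hf1
  set f2 := m2.flatten with hf2
  set n : Int → Nat := fun v => (min ((PySem.Dict.counter f1).getD v 0) ((PySem.Dict.counter f2).getD v 0)).toNat with hn
  rw [PySem.List.foldl_append_eq_flatMap]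
  set ks := PySem.List.sorted (((PySem.Dict.counter f1).keys).filter (fun k => (PySem.Dict.counter f2).contains k)) (fun x => x) false with hks
  -- facts about ks
  have hknodup : ks.Nodup := by
    have : (((PySem.Dict.counter f1).keys).filter (fun k => (PySem.Dict.counter f2).contains k)).Nodup :=
      (PySem.Dict.nodup_keys_counter f1).filter _
    exact ((PySem.List.sorted_perm _ _ _).nodup_iff).2 this
  have hklt : ks.Pairwise (· < ·) := by
    have hle : ks.Pairwise (fun a b => a ≤ b) := PySem.List.sorted_pairwise _ _
    exact (hle.and hknodup).imp (fun h => lt_of_le_of_ne h.1 h.2)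
  have hkmem : ∀ v : Int, v ∈ ks ↔ v ∈ f1 ∧ v ∈ f2 := by
    intro v
    rw [hks, PySem.List.mem_sorted, List.mem_filter]
    simp [PySem.Dict.keys_counter, PySem.Set.mem_ofList, PySem.Dict.contains_counter]
  -- the merge side
  set s1 := PySem.List.sorted f1 (fun x => x) false with hs1
  set s2 := PySem.List.sorted f2 (fun x => x) false with hs2
  have hp1 : s1.Pairwise (· ≤ ·) := PySem.List.sorted_pairwise _ _
  have hp2 : s2.Pairwise (· ≤ ·) := PySem.List.sorted_pairwise _ _
  -- equal counts everywhere
  have hcount : ∀ v : Int, (mergeDup s1 s2).count v = (ks.flatMap (fun v => List.replicate (n v) v)).count v := by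
    intro v
    rw [mergeDup_count s1 s2 hp1 hp2 v, blocks_count ks n hklt v,
        (PySem.List.sorted_perm f1 _ _).count_eq, (PySem.List.sorted_perm f2 _ _).count_eq]
    by_cases hv : v ∈ ks
    · rw [if_pos hv, hn]
      simp only [PySem.Dict.getD_counter]
      rcases le_total (f1.count v) (f2.count v) with hle | hle
      · rw [min_eq_left hle, min_eq_left (by exact_mod_cast hle), Int.toNat_natCast]
      · rw [min_eq_right hle, min_eq_right (by exact_mod_cast hle), Int.toNat_natCast]
    · rw [if_neg hv]
      have := (hkmem v).not.1 hv
      rcases Decidable.not_and_iff_or_not.1 this with hm | hm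
      · rw [List.count_eq_zero_of_not_mem hm]; simp
      · rw [List.count_eq_zero_of_not_mem hm]; simp
  -- both sides sorted, equal as multisets, hence equal
  have hperm : (mergeDup s1 s2).Perm (ks.flatMap (fun v => List.replicate (n v) v)) :=
    List.perm_iff_count.2 hcount
  exact hperm.eq_of_pairwise' (hp1.sublist (mergeDup_sublist_left s1 s2)) (blocks_pairwise ks n hklt)
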